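-- pv_equiv track=rewrite | github.com/felixdelbarrio/Analiza-Movies | frontend/tabs/charts_shared.py | _ordered_options
-- ===== SOURCE A (Python) =====
-- from typing import Any, Callable, Final, Iterable, TypeVar, cast
--
-- def _ordered_options(values: Iterable[object], order: list[str]) -> list[str]:
--     unique = {str(v) for v in values if v is not None and str(v).strip() != ""}
--     ordered: list[str] = []
--     for item in order:
--         if item in unique:
--             ordered.append(item)
--             unique.discard(item)
--     ordered.extend(sorted(unique))
--     return ordered
-- ===== SOURCE B (Python) =====
-- def _ordered_options(values, order):
--     unique = {str(v) for v in values if v is not None and str(v).strip() != ""}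
--     rank = {}
--     for i, name in enumerate(order):
--         rank.setdefault(name, i)
--     return sorted(unique, key=lambda v: (rank.get(v, len(order)), v))
-- ===== Notes on version B (the rewrite author's own statement) =====
-- stated objective: simpler
-- what changed: Replaced the explicit order-loop with discard-from-set plus extend(sorted(rest)) by a first-occurrence rank table over `order` and one sorted() call with the composite key (rank, value).
import Mathlib
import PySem

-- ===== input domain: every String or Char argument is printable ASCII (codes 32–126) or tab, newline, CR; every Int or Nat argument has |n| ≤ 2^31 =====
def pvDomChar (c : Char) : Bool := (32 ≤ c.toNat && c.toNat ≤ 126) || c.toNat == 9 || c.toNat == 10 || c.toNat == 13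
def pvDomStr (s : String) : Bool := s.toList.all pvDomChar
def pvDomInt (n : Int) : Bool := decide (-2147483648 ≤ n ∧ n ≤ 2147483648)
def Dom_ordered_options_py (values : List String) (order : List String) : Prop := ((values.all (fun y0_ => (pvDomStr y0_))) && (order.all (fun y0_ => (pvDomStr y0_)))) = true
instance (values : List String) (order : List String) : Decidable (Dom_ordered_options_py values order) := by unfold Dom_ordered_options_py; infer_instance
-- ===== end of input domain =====

-- B replaces A's explicit preference loop (append + discard from the set, then extend
-- with the sorted leftovers) by a first-occurrence rank table over `order` and a single
-- composite-key sort; objective: simpler.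

-- ===== PORT A =====
def ordered_options_py (values : List String) (order : List String) : List String :=
  -- unique = {str(v) for v in values if v is not None and str(v).strip() != ""}  (str(v) = v on strings; "v is not None" is always true)
  let unique : PySem.Set String := PySem.Set.ofList (values.filter (fun v => !(PySem.Str.strip v == "")))
  -- for item in order: if item in unique: ordered.append(item); unique.discard(item)
  let st := order.foldl (fun (st : List String × PySem.Set String) item =>
      if st.2.contains item then (st.1 ++ [item], PySem.Set.discard st.2 item) else st)
    (([] : List String), unique)
  -- ordered.extend(sorted(unique))
  st.1 ++ PySem.List.sorted st.2 (fun x => x) false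

-- ===== PORT B =====
def ordered_options_py_alt (values : List String) (order : List String) : List String :=
  let unique : PySem.Set String := PySem.Set.ofList (values.filter (fun v => !(PySem.Str.strip v == "")))
  -- rank = {}; for i, name in enumerate(order): rank.setdefault(name, i)
  let rank : PySem.Dict String Int :=
    (PySem.List.enumerate order).foldl (fun d p => d.setdefault p.2 p.1) PySem.Dict.empty
  -- return sorted(unique, key=lambda v: (rank.get(v, len(order)), v))   (tuple key → sorted2)
  PySem.List.sorted2 unique (fun v => rank.getD v (order.length : Int)) (fun v => v) false

-- ===== PRECONDITION & SPEC =====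
def Spec_ordered_options_py (values : List String) (order : List String) (out : List String) : Prop := out = ordered_options_py_alt values order
instance (values : List String) (order : List String) (out : List String) : Decidable (Spec_ordered_options_py values order out) := by unfold Spec_ordered_options_py; infer_instance

-- ===== CLAIM (what is proved, stated in full; the proofs are below) =====
def Claim_equal_ordered_options_py : Prop := ∀ (values : List String) (order : List String), Dom_ordered_options_py values order → Spec_ordered_options_py values order (ordered_options_py values order)

-- ===== LEMMAS AND PROOFS =====

-- the items A's loop appends (first occurrence in `order` of each set element), and what is left of the set
def pickL (o : List String) (s : PySem.Set String) : List String :=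
  match o with
  | [] => []
  | a :: o => if PySem.Set.contains s a then a :: pickL o (PySem.Set.discard s a) else pickL o s

def remL (o : List String) (s : PySem.Set String) : PySem.Set String :=
  match o with
  | [] => s
  | a :: o => if PySem.Set.contains s a then remL o (PySem.Set.discard s a) else remL o s

-- first-occurrence rank of v in o, len(o) if absent (what B's dict lookup computes)
def rnk (o : List String) (v : String) : Int :=
  match PySem.List.index? o v with
  | some k => (k : Int)
  | none => (o.length : Int)

theorem loop_eq (o : List String) (acc : List String) (s : PySem.Set String) :
    o.foldl (fun (st : List String × PySem.Set String) item =>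
        if st.2.contains item then (st.1 ++ [item], PySem.Set.discard st.2 item) else st) (acc, s)
      = (acc ++ pickL o s, remL o s) := by
  induction o generalizing acc s with
  | nil => simp [pickL, remL]
  | cons a o ih =>
    rw [List.foldl_cons]
    by_cases h : PySem.Set.contains s a
    · rw [if_pos (show (acc, s).2.contains a = true from h), ih]
      simp only [pickL, remL]
      rw [if_pos (show PySem.Set.contains s a = true from h),
        if_pos (show PySem.Set.contains s a = true from h)]
      simp
    · rw [if_neg (show ¬ (acc, s).2.contains a = true from h), ih]
      simp only [pickL, remL]
      rw [if_neg (show ¬ PySem.Set.contains s a = true from h),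
        if_neg (show ¬ PySem.Set.contains s a = true from h)]

theorem pick_mem {o : List String} {s : PySem.Set String} {v : String} (h : v ∈ pickL o s) :
    v ∈ s ∧ v ∈ o := by
  induction o generalizing s with
  | nil => simp [pickL] at h
  | cons a o ih =>
    by_cases hc : PySem.Set.contains s a
    · simp only [pickL, hc, if_pos] at h
      rcases List.mem_cons.mp h with rfl | h
      · exact ⟨by simpa using hc, List.mem_cons_self⟩
      · rcases ih h with ⟨hs, ho⟩
        refine ⟨?_, List.mem_cons_of_mem _ ho⟩
        simp only [PySem.Set.discard, List.mem_filter] at hs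
        exact hs.1
    · simp only [pickL, hc, if_neg, Bool.false_eq_true, not_false_iff] at h
      rcases ih h with ⟨hs, ho⟩
      exact ⟨hs, List.mem_cons_of_mem _ ho⟩

theorem not_mem_discard (s : PySem.Set String) (a : String) : a ∉ PySem.Set.discard s a := by
  simp [PySem.Set.discard, List.mem_filter]

theorem mem_of_contains {s : PySem.Set String} {a : String} (h : PySem.Set.contains s a = false) :
    ∀ v ∈ s, v ≠ a := by
  intro v hv heq
  subst heq
  exact absurd hv (by simpa using h)

theorem rnk_cons_self (a : String) (o : List String) : rnk (a :: o) a = 0 := by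
  unfold rnk
  rw [PySem.List.index?_cons_self]
  simp

theorem rnk_cons_of_ne {v a : String} (o : List String) (h : v ≠ a) :
    rnk (a :: o) v = rnk o v + 1 := by
  unfold rnk
  rw [PySem.List.index?_cons_of_ne o (Ne.symm h)]
  cases PySem.List.index? o v with
  | none => simp
  | some k => simp

theorem rnk_nonneg (o : List String) (v : String) : 0 ≤ rnk o v := by
  unfold rnk
  cases PySem.List.index? o v <;> simp

theorem rnk_lt_of_mem {o : List String} {v : String} (h : v ∈ o) : rnk o v < (o.length : Int) := by
  unfold rnk
  cases hio : PySem.List.index? o v with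
  | none => exact absurd ((PySem.List.index?_eq_none_iff o v).mp hio) (not_not_intro h)
  | some k =>
    obtain ⟨hk, _, _⟩ := PySem.List.getElem_of_index?_eq_some hio
    simpa using hk

theorem rnk_of_not_mem {o : List String} {v : String} (h : v ∉ o) : rnk o v = (o.length : Int) := by
  unfold rnk
  rw [(PySem.List.index?_eq_none_iff o v).mpr h]

theorem pick_pairwise (o : List String) (s : PySem.Set String) :
    (pickL o s).Pairwise (fun u v => rnk o u < rnk o v) := by
  induction o generalizing s with
  | nil => simp [pickL]
  | cons a o ih =>
    by_cases hc : PySem.Set.contains s a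
    · simp only [pickL, hc, if_pos]
      refine List.Pairwise.cons ?_ ?_
      · intro v hv
        have hne : v ≠ a := by
          intro rfl_eq; subst rfl_eq
          exact not_mem_discard s v (pick_mem hv).1
        rw [rnk_cons_self, rnk_cons_of_ne o hne]
        have := rnk_nonneg o v
        omega
      · refine (ih (PySem.Set.discard s a)).imp_of_mem ?_
        intro u v hu hv huv
        have hnu : u ≠ a := fun h => not_mem_discard s a (h ▸ (pick_mem hu).1)
        have hnv : v ≠ a := fun h => not_mem_discard s a (h ▸ (pick_mem hv).1)
        rw [rnk_cons_of_ne o hnu, rnk_cons_of_ne o hnv]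
        omega
    · simp only [pickL, hc, Bool.false_eq_true, if_neg, not_false_iff]
      refine (ih s).imp_of_mem ?_
      intro u v hu hv huv
      have hnu : u ≠ a := mem_of_contains (by simpa using hc) u (pick_mem hu).1
      have hnv : v ≠ a := mem_of_contains (by simpa using hc) v (pick_mem hv).1
      rw [rnk_cons_of_ne o hnu, rnk_cons_of_ne o hnv]
      omega

theorem rem_subset {o : List String} {s : PySem.Set String} {v : String} (h : v ∈ remL o s) :
    v ∈ s ∧ v ∉ o := by
  induction o generalizing s with
  | nil => exact ⟨h, by simp⟩
  | cons a o ih =>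
    by_cases hc : PySem.Set.contains s a
    · simp only [remL, hc, if_pos] at h
      rcases ih h with ⟨hs, ho⟩
      have hna : v ≠ a := by
        intro rfl_eq; subst rfl_eq
        exact not_mem_discard s v hs
      have hvs : v ∈ s := by
        simp only [PySem.Set.discard, List.mem_filter] at hs
        exact hs.1
      exact ⟨hvs, by simp [hna, ho]⟩
    · simp only [remL, hc, Bool.false_eq_true, if_neg, not_false_iff] at h
      rcases ih h with ⟨hs, ho⟩
      exact ⟨hs, by simp [mem_of_contains (by simpa using hc) v hs, ho]⟩

theorem discard_eq_erase {s : PySem.Set String} (hs : s.Nodup) (a : String) :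
    PySem.Set.discard s a = s.erase a := by
  rw [List.Nodup.erase_eq_filter hs a]
  rfl

theorem pick_rem_perm (o : List String) (s : PySem.Set String) (hs : s.Nodup) :
    (pickL o s ++ remL o s).Perm s := by
  induction o generalizing s with
  | nil => simp [pickL, remL]
  | cons a o ih =>
    by_cases hc : PySem.Set.contains s a
    · have ha : a ∈ s := by
        simpa [PySem.Set.contains, List.contains_iff_exists_mem_beq] using hc
      have hnd : (PySem.Set.discard s a).Nodup := List.Nodup.filter _ hs
      simp only [pickL, remL, hc, if_pos, List.cons_append]
      refine List.Perm.trans (List.Perm.cons a (ih _ hnd)) ?_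
      rw [discard_eq_erase hs a]
      exact (List.perm_cons_erase ha).symm
    · simp only [pickL, remL, hc, Bool.false_eq_true, if_neg, not_false_iff]
      exact ih s hs

theorem rem_nodup (o : List String) (s : PySem.Set String) (hs : s.Nodup) : (remL o s).Nodup := by
  exact List.Nodup.of_append_right (((pick_rem_perm o s hs).nodup_iff).mpr hs)

theorem rank_get (o : List String) (v : String) :
    ∀ (s0 : Int) (d : PySem.Dict String Int),
      ((PySem.List.enumerate o s0).foldl (fun d p => d.setdefault p.2 p.1) d).get? v
        = match d.get? v with
          | some x => some x
          | none => (PySem.List.index? o v).map (fun k => s0 + (k : Int)) := by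
  induction o with
  | nil =>
    intro s0 d
    cases hd : d.get? v <;> simp [PySem.List.enumerate, hd]
  | cons a o ih =>
    intro s0 d
    have he : PySem.List.enumerate (a :: o) s0 = (s0, a) :: PySem.List.enumerate o (s0 + 1) := rfl
    rw [he, List.foldl_cons]
    by_cases hc : d.contains a
    · rw [show (d.setdefault a s0) = d from PySem.Dict.setdefault_of_contains d s0 hc, ih]
      by_cases hv : v = a
      · subst hv
        have hsome : (d.get? v).isSome := by rw [← PySem.Dict.contains_eq_isSome_get?]; exact hc
        obtain ⟨x, hx⟩ := Option.isSome_iff_exists.mp hsome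
        rw [hx]
      · cases hd : d.get? v with
        | some x => rfl
        | none =>
          rw [PySem.List.index?_cons_of_ne o (Ne.symm hv)]
          cases hio : PySem.List.index? o v <;> simp [hio] <;> push_cast <;> ring
    · rw [show (d.setdefault a s0) = d.insert a s0 from
          PySem.Dict.setdefault_of_not_contains d s0 (by simpa using hc), ih]
      by_cases hv : v = a
      · subst hv
        rw [PySem.Dict.get?_insert_self,
          (PySem.Dict.get?_eq_none_iff_contains d v).mpr (by simpa using hc),
          PySem.List.index?_cons_self]
        simp
      · rw [PySem.Dict.get?_insert_of_ne _ _ hv]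
        cases hd : d.get? v with
        | some x => rfl
        | none =>
          rw [PySem.List.index?_cons_of_ne o (Ne.symm hv)]
          cases hio : PySem.List.index? o v <;> simp [hio] <;> push_cast <;> ring

theorem rankD_eq_rnk (o : List String) (v : String) :
    ((PySem.List.enumerate o).foldl (fun d p => d.setdefault p.2 p.1) PySem.Dict.empty).getD v
        ((o.length : Int)) = rnk o v := by
  rw [PySem.Dict.getD_eq_get?_getD, rank_get o v 0 PySem.Dict.empty]
  rw [PySem.Dict.get?_empty]
  unfold rnk
  cases hio : PySem.List.index? o v <;> simp

theorem sorted2_eq_of_perm_of_pairwise_lt {α : Type} (xs ys : List α) (k1 : α → Int) (k2 : α → String)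
    (hp : ys.Perm xs)
    (hpw : ys.Pairwise (fun a b => k1 a < k1 b ∨ (k1 a = k1 b ∧ k2 a < k2 b))) :
    PySem.List.sorted2 xs k1 k2 = ys := by
  have hfun : (fun a b => decide (k1 a < k1 b) || (!decide (k1 b < k1 a) && decide (k2 a < k2 b)))
      = (fun a b => decide ((toLex (k1 a, k2 a) : Lex (Int × String)) < toLex (k1 b, k2 b))) := by
    funext a b
    rcases lt_trichotomy (k1 a) (k1 b) with h | h | h
    · simp [Prod.Lex.lt_iff, h]
    · simp [Prod.Lex.lt_iff, h, lt_irrefl]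
    · simp [Prod.Lex.lt_iff, h.asymm, h.ne', h]
  have hstep : PySem.List.sorted2 xs k1 k2
      = PySem.List.sorted xs (fun a => (toLex (k1 a, k2 a) : Lex (Int × String))) false := by
    rw [PySem.List.sorted_eq_foldl_insertBy]
    show List.foldl _ [] xs = _
    rw [hfun]
    rfl
  rw [hstep]
  refine PySem.List.sorted_eq_of_perm_of_pairwise_lt xs ys _ hp ?_
  refine hpw.imp ?_
  intro a b hab
  exact Prod.Lex.lt_iff.mpr (by simpa using hab)

-- ===== VERDICT (by name: the statement is the Claim_ definition above) =====
theorem ordered_options_py_spec : Claim_equal_ordered_options_py := by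
  intro values order _
  unfold Spec_ordered_options_py ordered_options_py ordered_options_py_alt
  set U : PySem.Set String := PySem.Set.ofList (values.filter (fun v => !(PySem.Str.strip v == ""))) with hU
  have hUnd : U.Nodup := PySem.Set.nodup_ofList _
  show (order.foldl (fun (st : List String × PySem.Set String) item =>
        if st.2.contains item then (st.1 ++ [item], PySem.Set.discard st.2 item) else st) ([], U)).1
      ++ PySem.List.sorted (order.foldl (fun (st : List String × PySem.Set String) item =>
        if st.2.contains item then (st.1 ++ [item], PySem.Set.discard st.2 item) else st) ([], U)).2
        (fun x => x) false
    = PySem.List.sorted2 U (fun v => ((PySem.List.enumerate order).foldl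
        (fun d p => d.setdefault p.2 p.1) PySem.Dict.empty).getD v ((order.length : Int)))
        (fun v => v) false
  rw [loop_eq order [] U, List.nil_append]
  have hk1 : (fun v => ((PySem.List.enumerate order).foldl
        (fun d p => d.setdefault p.2 p.1) PySem.Dict.empty).getD v ((order.length : Int)))
      = rnk order := funext (fun v => rankD_eq_rnk order v)
  rw [hk1]
  symm
  refine sorted2_eq_of_perm_of_pairwise_lt U _ (rnk order) (fun v => v) ?_ ?_
  · refine List.Perm.trans (List.Perm.append_left _ (PySem.List.sorted_perm _ _ _)) ?_
    exact pick_rem_perm order U hUnd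
  · rw [List.pairwise_append]
    refine ⟨(pick_pairwise order U).imp (fun h => Or.inl h), ?_, ?_⟩
    · have hperm : (PySem.List.sorted (remL order U) (fun x => x) false).Perm (remL order U) :=
        PySem.List.sorted_perm _ _ _
      have hnd : (PySem.List.sorted (remL order U) (fun x => x) false).Nodup :=
        hperm.nodup_iff.mpr (rem_nodup order U hUnd)
      have hle : (PySem.List.sorted (remL order U) (fun x => x) false).Pairwise
          (fun a b => (fun x => x) a ≤ (fun x => x) b) := PySem.List.sorted_pairwise _ _
      refine (hle.and hnd).imp_of_mem ?_
      intro a b ha hb hab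
      have hra : a ∈ remL order U := hperm.mem_iff.mp ha
      have hrb : b ∈ remL order U := hperm.mem_iff.mp hb
      refine Or.inr ⟨?_, lt_of_le_of_ne hab.1 hab.2⟩
      rw [rnk_of_not_mem (rem_subset hra).2, rnk_of_not_mem (rem_subset hrb).2]
    · intro a ha b hb
      have h1 : rnk order a < (order.length : Int) := rnk_lt_of_mem (pick_mem ha).2
      have h2 : rnk order b = (order.length : Int) :=
        rnk_of_not_mem (rem_subset ((PySem.List.sorted_perm _ _ _).mem_iff.mp hb)).2
      exact Or.inl (by omega)
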